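-- pv_equiv track=rewrite | github.com/Syed-Git308/QuerySense | backend/ai-service/app/answer_generation_ai.py | _determine_source_document
-- ===== SOURCE A (Python) =====
-- from typing import List, Dict, Any, Optional
--
-- def _determine_source_document(question: str, documents: List[Dict[str, Any]]) -> Optional[str]:
--     """Determine which document is most likely to contain the answer"""
--     question_lower = question.lower()
--
--     # Prioritize based on question type
--     if any(word in question_lower for word in ['department', 'employee', 'budget', 'most', 'total']):
--         csv_docs = [doc for doc in documents if doc.get('filename', '').endswith('.csv')]
--         if csv_docs:
--             return csv_docs[0].get('filename')
--
--     if any(word in question_lower for word in ['first day', 'onboarding', 'new employee']):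
--         onboarding_docs = [doc for doc in documents if 'onboarding' in doc.get('filename', '').lower()]
--         if onboarding_docs:
--             return onboarding_docs[0].get('filename')
--
--     if any(word in question_lower for word in ['vacation', 'policy', 'time off']):
--         policy_docs = [doc for doc in documents if any(word in doc.get('filename', '').lower()
--                       for word in ['policy', 'vacation'])]
--         if policy_docs:
--             return policy_docs[0].get('filename')
--
--     # Return the first document as fallback
--     return documents[0].get('filename') if documents else None
-- ===== SOURCE B (Python) =====
-- from typing import List, Dict, Any, Optional
--
-- # Score-and-argmin rewrite: each document receives ONE numeric score (the index of
-- # the first triggered rule predicate its filename satisfies, or len(preds) if none);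
-- # the earliest document with a strictly best score is chosen in a single pass over
-- # the documents, instead of one filter pass per rule.
-- _RULES = [
--     (('department', 'employee', 'budget', 'most', 'total'),
--      lambda f: f.endswith('.csv')),
--     (('first day', 'onboarding', 'new employee'),
--      lambda f: 'onboarding' in f.lower()),
--     (('vacation', 'policy', 'time off'),
--      lambda f: 'policy' in f.lower() or 'vacation' in f.lower()),
-- ]
--
-- def _determine_source_document(question: str, documents: List[Dict[str, Any]]) -> Optional[str]:
--     q = question.lower()
--     preds = [pred for kws, pred in _RULES if any(k in q for k in kws)]
--
--     def score(doc):
--         f = doc.get('filename', '')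
--         for i, pred in enumerate(preds):
--             if pred(f):
--                 return i
--         return len(preds)
--
--     best_doc, best_score = None, len(preds)
--     for doc in documents:
--         s = score(doc)
--         if s < best_score:
--             best_doc, best_score = doc, s
--     if best_doc is not None:
--         return best_doc.get('filename')
--     return documents[0].get('filename') if documents else None
-- ===== Notes on version B (the rewrite author's own statement) =====
-- stated objective: alternative
-- what changed: Replaces A's sequence of per-rule filter passes over the documents with a single argmin pass: every document gets one numeric score (the index of the first triggered rule predicate its filename satisfies, or a sentinel), and the earliest document with the strictly best score is selected.
import Mathlib
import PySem

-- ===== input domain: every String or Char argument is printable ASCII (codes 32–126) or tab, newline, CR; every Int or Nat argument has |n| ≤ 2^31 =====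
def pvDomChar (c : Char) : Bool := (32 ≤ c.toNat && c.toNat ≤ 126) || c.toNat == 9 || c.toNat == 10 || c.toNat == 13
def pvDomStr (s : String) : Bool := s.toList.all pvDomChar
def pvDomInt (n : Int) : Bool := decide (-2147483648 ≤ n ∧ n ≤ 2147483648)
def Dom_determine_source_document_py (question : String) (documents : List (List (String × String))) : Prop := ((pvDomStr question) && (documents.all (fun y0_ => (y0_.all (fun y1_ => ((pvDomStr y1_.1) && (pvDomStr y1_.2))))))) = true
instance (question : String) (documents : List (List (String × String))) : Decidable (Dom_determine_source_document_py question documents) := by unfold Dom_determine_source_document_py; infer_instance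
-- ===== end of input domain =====

-- B replaces A's per-rule filter passes by a single argmin pass: every document gets one
-- numeric score (index of the first triggered rule predicate its filename satisfies) and
-- the earliest best-scoring document wins (objective: alternative; same cost).

-- ===== PORT A =====
-- doc.get(k) on an assoc-list dict: first matching key
def aGet? (d : List (String × String)) (k : String) : Option String :=
  (d.find? (fun p => p.1 == k)).map Prod.snd

-- 'return documents[0].get('filename') if documents else None'
def aFallback (documents : List (List (String × String))) : Option String :=
  match documents with
  | d :: _ => aGet? d "filename"
  | [] => none

-- third if-block of A
def aRule3 (ql : String) (documents : List (List (String × String))) : Option String :=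
  if ["vacation", "policy", "time off"].any (fun w => PySem.Str.isIn w ql) then
    match documents.filter (fun d =>
        ["policy", "vacation"].any (fun w =>
          PySem.Str.isIn w (PySem.Str.lower ((aGet? d "filename").getD "")))) with
    | d :: _ => aGet? d "filename"
    | [] => aFallback documents
  else aFallback documents

-- second if-block of A
def aRule2 (ql : String) (documents : List (List (String × String))) : Option String :=
  if ["first day", "onboarding", "new employee"].any (fun w => PySem.Str.isIn w ql) then
    match documents.filter (fun d =>
        PySem.Str.isIn "onboarding" (PySem.Str.lower ((aGet? d "filename").getD ""))) with
    | d :: _ => aGet? d "filename"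
    | [] => aRule2_next ql documents
  else aRule2_next ql documents
where aRule2_next (ql : String) (documents : List (List (String × String))) : Option String :=
  aRule3 ql documents

def determine_source_document_py (question : String) (documents : List (List (String × String))) : Option String :=
  let ql := PySem.Str.lower question
  if ["department", "employee", "budget", "most", "total"].any (fun w => PySem.Str.isIn w ql) then
    match documents.filter (fun d =>
        PySem.Str.endswith ((aGet? d "filename").getD "") ".csv") with
    | d :: _ => aGet? d "filename"
    | [] => aRule2 ql documents
  else aRule2 ql documents

-- ===== PORT B =====
-- doc.get(k): first-match lookup on the assoc list
def bLookup (d : List (String × String)) (k : String) : Option String :=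
  (d.find? (fun p => p.1 == k)).map Prod.snd

-- the rules table: (question keywords, filename predicate)
def bRules : List (List String × (String → Bool)) :=
  [ (["department", "employee", "budget", "most", "total"],
       fun f => PySem.Str.endswith f ".csv"),
    (["first day", "onboarding", "new employee"],
       fun f => PySem.Str.isIn "onboarding" (PySem.Str.lower f)),
    (["vacation", "policy", "time off"],
       fun f => PySem.Str.isIn "policy" (PySem.Str.lower f) || PySem.Str.isIn "vacation" (PySem.Str.lower f)) ]

-- score(doc): index of the first triggered predicate the filename satisfies, else len(preds)
def bScore (preds : List (String → Bool)) (f : String) : Nat :=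
  match preds with
  | [] => 0
  | p :: rest => if p f then 0 else bScore rest f + 1

-- one step of the argmin loop over documents
def bStep (preds : List (String → Bool))
    (st : Option (List (String × String)) × Nat) (doc : List (String × String)) :
    Option (List (String × String)) × Nat :=
  let s := bScore preds ((bLookup doc "filename").getD "")
  if s < st.2 then (some doc, s) else st

def determine_source_document_py_alt (question : String) (documents : List (List (String × String))) : Option String :=
  let ql := PySem.Str.lower question
  let preds := (bRules.filter (fun r => r.1.any (fun k => PySem.Str.isIn k ql))).map Prod.snd
  let st := documents.foldl (bStep preds) (none, preds.length)
  match st.1 with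
  | some d => bLookup d "filename"
  | none =>
    match documents with
    | d :: _ => bLookup d "filename"
    | [] => none

-- ===== PRECONDITION & SPEC =====
def Spec_determine_source_document_py (question : String) (documents : List (List (String × String))) (out : Option String) : Prop := out = determine_source_document_py_alt question documents
instance (question : String) (documents : List (List (String × String))) (out : Option String) : Decidable (Spec_determine_source_document_py question documents out) := by unfold Spec_determine_source_document_py; infer_instance

-- ===== CLAIM (what is proved, stated in full; the proofs are below) =====
def Claim_equal_determine_source_document_py : Prop := ∀ (question : String) (documents : List (List (String × String))), Dom_determine_source_document_py question documents → Spec_determine_source_document_py question documents (determine_source_document_py question documents)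

-- ===== LEMMAS AND PROOFS =====

-- A's chain of guard-plus-filter blocks, generically over the list of triggered predicates
def aChain (preds : List (String → Bool)) (documents : List (List (String × String))) : Option String :=
  match preds with
  | [] => aFallback documents
  | p :: rest =>
    match documents.filter (fun d => p ((aGet? d "filename").getD "")) with
    | d :: _ => aGet? d "filename"
    | [] => aChain rest documents

-- B's finishing step after the fold
def bFinish (documents : List (List (String × String)))
    (st : Option (List (String × String)) × Nat) : Option String :=
  match st.1 with
  | some d => bLookup d "filename"
  | none =>
    match documents with
    | d :: _ => bLookup d "filename"
    | [] => none

-- first match = head of the filtered list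
theorem find?_eq_head?_filter {α : Type} (p : α → Bool) (l : List α) :
    l.find? p = (l.filter p).head? := by
  induction l with
  | nil => rfl
  | cons a t ih =>
    by_cases h : p a = true
    · rw [List.find?_cons_of_pos h, List.filter_cons, if_pos h]
      rfl
    · rw [List.find?_cons_of_neg h, List.filter_cons, if_neg h]
      exact ih

-- a state with score 0 is a fixed point of the fold
theorem fold_fixed_zero (preds : List (String → Bool)) (docs : List (List (String × String)))
    (st : Option (List (String × String)) × Nat) (h : st.2 = 0) :
    docs.foldl (bStep preds) st = st := by
  induction docs generalizing st with
  | nil => rfl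
  | cons d t ih =>
    simp only [List.foldl_cons, bStep, h]
    simp only [Nat.not_lt_zero, if_false]
    exact ih st h

-- if some document satisfies the head predicate, the fold ends at the first such document
theorem fold_zero_wins (p : String → Bool) (rest : List (String → Bool))
    (docs : List (List (String × String))) (d : List (String × String))
    (st : Option (List (String × String)) × Nat) (hst : 1 ≤ st.2)
    (hf : docs.find? (fun x => p ((aGet? x "filename").getD "")) = some d) :
    (docs.foldl (bStep (p :: rest)) st).1 = some d := by
  induction docs generalizing st with
  | nil => simp at hf
  | cons x t ih =>
    by_cases hx : p ((aGet? x "filename").getD "") = true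
    · have hfx : List.find? (fun y => p ((aGet? y "filename").getD "")) (x :: t) = some x :=
        List.find?_cons_of_pos (by simpa using hx)
      rw [hfx] at hf
      injection hf with hd
      subst hd
      show (List.foldl (bStep (p :: rest)) (bStep (p :: rest) st x) t).1 = some x
      have hstep : bStep (p :: rest) st x = (some x, 0) := by
        simp only [bStep, bScore]
        rw [show ((bLookup x "filename").getD "") = ((aGet? x "filename").getD "") from rfl]
        rw [if_pos hx, if_pos (by omega)]
      rw [hstep, fold_fixed_zero _ _ _ rfl]
    · have hfx : List.find? (fun y => p ((aGet? y "filename").getD "")) (x :: t) =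
          List.find? (fun y => p ((aGet? y "filename").getD "")) t :=
        List.find?_cons_of_neg (by simpa using hx)
      rw [hfx] at hf
      rw [List.foldl_cons]
      have h2 : 1 ≤ (bStep (p :: rest) st x).2 := by
        simp only [bStep, bScore]
        rw [show ((bLookup x "filename").getD "") = ((aGet? x "filename").getD "") from rfl]
        rw [if_neg hx]
        split
        · omega
        · exact hst
      exact ih _ h2 hf

-- if no document satisfies the head predicate, the fold behaves like the fold over the tail
-- predicates, with every score and threshold shifted by one
theorem fold_shift (p : String → Bool) (rest : List (String → Bool))
    (docs : List (List (String × String)))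
    (hall : ∀ x ∈ docs, p ((aGet? x "filename").getD "") = false)
    (b0 : Option (List (String × String))) (s0 : Nat) :
    docs.foldl (bStep (p :: rest)) (b0, s0 + 1) =
      ((docs.foldl (bStep rest) (b0, s0)).1, (docs.foldl (bStep rest) (b0, s0)).2 + 1) := by
  induction docs generalizing b0 s0 with
  | nil => rfl
  | cons x t ih =>
    have hx := hall x (List.mem_cons_self ..)
    simp only [List.foldl_cons, bStep, bScore]
    rw [show (bLookup x "filename") = aGet? x "filename" from rfl, hx]
    simp only [if_false, Bool.false_eq_true]
    by_cases hlt : bScore rest ((aGet? x "filename").getD "") < s0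
    · rw [if_pos (by omega), if_pos hlt]
      exact ih (fun y hy => hall y (List.mem_cons_of_mem _ hy)) _ _
    · rw [if_neg (by omega), if_neg hlt]
      exact ih (fun y hy => hall y (List.mem_cons_of_mem _ hy)) _ _

-- main lemma: the argmin fold computes A's chain of guarded filters
theorem fold_eq_chain (preds : List (String → Bool)) (docs : List (List (String × String))) :
    bFinish docs (docs.foldl (bStep preds) (none, preds.length)) = aChain preds docs := by
  induction preds with
  | nil =>
    rw [fold_fixed_zero _ _ _ rfl]
    rfl
  | cons p rest ih =>
    simp only [aChain]
    cases hfil : docs.filter (fun d => p ((aGet? d "filename").getD "")) with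
    | cons d tl =>
      have hfd : docs.find? (fun d => p ((aGet? d "filename").getD "")) = some d := by
        rw [find?_eq_head?_filter, hfil]
        rfl
      have h1 := fold_zero_wins p rest docs d (none, (p :: rest).length) (by simp) hfd
      simp only [bFinish, h1]
      rfl
    | nil =>
      have hall : ∀ x ∈ docs, p ((aGet? x "filename").getD "") = false := by
        intro x hx
        have := List.filter_eq_nil_iff.mp hfil x hx
        simpa using this
      rw [show (p :: rest).length = rest.length + 1 from rfl,
        fold_shift p rest docs hall none rest.length]
      exact ih

-- ===== VERDICT (by name: the statement is the Claim_ definition above) =====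
theorem determine_source_document_py_spec : Claim_equal_determine_source_document_py := by
  intro question documents _
  unfold Spec_determine_source_document_py
  unfold determine_source_document_py determine_source_document_py_alt
  set ql := PySem.Str.lower question with hql
  by_cases h1 : (["department", "employee", "budget", "most", "total"].any (fun w => PySem.Str.isIn w ql)) = true <;>
  by_cases h2 : (["first day", "onboarding", "new employee"].any (fun w => PySem.Str.isIn w ql)) = true <;>
  by_cases h3 : (["vacation", "policy", "time off"].any (fun w => PySem.Str.isIn w ql)) = true <;>
    simp only [aRule2, aRule2.aRule2_next, aRule3, h1, h2, h3, if_true, Bool.false_eq_true,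
      if_false, bRules, List.filter_cons, List.filter_nil, List.map_cons, List.map_nil,
      List.any_cons, List.any_nil, Bool.or_false]
  · change _ = bFinish documents (List.foldl (bStep [(fun f => PySem.Str.endswith f ".csv"), (fun f => PySem.Str.isIn "onboarding" (PySem.Str.lower f)), (fun f => PySem.Str.isIn "policy" (PySem.Str.lower f) || PySem.Str.isIn "vacation" (PySem.Str.lower f))]) (none, List.length [(fun f => PySem.Str.endswith f ".csv"), (fun f => PySem.Str.isIn "onboarding" (PySem.Str.lower f)), (fun f => PySem.Str.isIn "policy" (PySem.Str.lower f) || PySem.Str.isIn "vacation" (PySem.Str.lower f))]) documents)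
    rw [fold_eq_chain]
    simp only [aChain]
  · change _ = bFinish documents (List.foldl (bStep [(fun f => PySem.Str.endswith f ".csv"), (fun f => PySem.Str.isIn "onboarding" (PySem.Str.lower f))]) (none, List.length [(fun f => PySem.Str.endswith f ".csv"), (fun f => PySem.Str.isIn "onboarding" (PySem.Str.lower f))]) documents)
    rw [fold_eq_chain]
    simp only [aChain]
  · change _ = bFinish documents (List.foldl (bStep [(fun f => PySem.Str.endswith f ".csv"), (fun f => PySem.Str.isIn "policy" (PySem.Str.lower f) || PySem.Str.isIn "vacation" (PySem.Str.lower f))]) (none, List.length [(fun f => PySem.Str.endswith f ".csv"), (fun f => PySem.Str.isIn "policy" (PySem.Str.lower f) || PySem.Str.isIn "vacation" (PySem.Str.lower f))]) documents)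
    rw [fold_eq_chain]
    simp only [aChain]
  · change _ = bFinish documents (List.foldl (bStep [(fun f => PySem.Str.endswith f ".csv")]) (none, List.length [(fun f => PySem.Str.endswith f ".csv")]) documents)
    rw [fold_eq_chain]
    simp only [aChain]
  · change _ = bFinish documents (List.foldl (bStep [(fun f => PySem.Str.isIn "onboarding" (PySem.Str.lower f)), (fun f => PySem.Str.isIn "policy" (PySem.Str.lower f) || PySem.Str.isIn "vacation" (PySem.Str.lower f))]) (none, List.length [(fun f => PySem.Str.isIn "onboarding" (PySem.Str.lower f)), (fun f => PySem.Str.isIn "policy" (PySem.Str.lower f) || PySem.Str.isIn "vacation" (PySem.Str.lower f))]) documents)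
    rw [fold_eq_chain]
    simp only [aChain]
  · change _ = bFinish documents (List.foldl (bStep [(fun f => PySem.Str.isIn "onboarding" (PySem.Str.lower f))]) (none, List.length [(fun f => PySem.Str.isIn "onboarding" (PySem.Str.lower f))]) documents)
    rw [fold_eq_chain]
    simp only [aChain]
  · change _ = bFinish documents (List.foldl (bStep [(fun f => PySem.Str.isIn "policy" (PySem.Str.lower f) || PySem.Str.isIn "vacation" (PySem.Str.lower f))]) (none, List.length [(fun f => PySem.Str.isIn "policy" (PySem.Str.lower f) || PySem.Str.isIn "vacation" (PySem.Str.lower f))]) documents)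
    rw [fold_eq_chain]
    simp only [aChain]
  · change _ = bFinish documents (List.foldl (bStep ([] : List (String → Bool))) (none, List.length ([] : List (String → Bool))) documents)
    rw [fold_eq_chain]
    simp only [aChain]
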